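-- pv_equiv track=rewrite | github.com/Nikkuniku/AtcoderProgramming | ABC/ABC100~ABC199/ABC162/f2.py | solve
-- ===== SOURCE A (Python) =====
-- def solve(A):
--     N = len(A)
--     M = N // 2
--     INF = 1 << 60
--     dp = [[-INF] * 2 for _ in range(M + 1)]
--     dp[0] = [0, 0]
--     if N % 2 == 0:
--         for i in range(N):
--             k = i // 2
--             if i % 2 == 0:
--                 dp[k + 1][0] = dp[k][0] + A[i]
--             else:
--                 dp[k + 1][1] = max(dp[k][0], dp[k][1]) + A[i]
--         ans = max(dp[M])
--     else:
--         for i in range(N - 1):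
--             k = i // 2
--             if i % 2 == 0:
--                 dp[k + 1][0] = dp[k][0] + A[i]
--             else:
--                 dp[k + 1][1] = max(dp[k]) + A[i]
--         B = A[::-1]
--         ep = [[-INF] * 2 for _ in range(M + 1)]
--         ep[0] = [0, 0]
--         for i in range(N - 1):
--             k = i // 2
--             if i % 2 == 0:
--                 ep[k + 1][0] = ep[k][0] + B[i]
--             else:
--                 ep[k + 1][1] = max(ep[k]) + B[i]
--         ep = ep[::-1]
--         ans = max(max(dp[-1]), max(ep[0]))
--         for j in range(1, N, 2):
--             p = j // 2
--             q = (j // 2) + 1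
--             ans = max(ans, dp[p][0] + A[j - 1] + max(ep[q]))
--             ans = max(ans, max(dp[p]) + A[j] + max(ep[q]))
--             ans = max(ans, max(dp[p]) + A[j + 1] + ep[q][0])
--     return ans
-- ===== SOURCE B (Python) =====
-- def solve(A):
--     # Switch-point enumeration over prefix sums instead of A's DP passes:
--     # an optimal choice of N//2 non-adjacent elements takes even indices up to a
--     # switch point, then odd indices (and, for odd N, a final run of indices
--     # shifted by two); enumerate the switch points over precomputed prefix sums.
--     N = len(A)
--     M = N // 2
--     pe = [0]
--     for x in A[0::2]:
--         pe.append(pe[-1] + x)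
--     po = [0]
--     for x in A[1::2]:
--         po.append(po[-1] + x)
--     if N % 2 == 0:
--         best = po[M]
--         for s in range(M + 1):
--             best = max(best, pe[s] + po[M] - po[s])
--         return best
--     pt = [0]
--     for x in A[2::2]:
--         pt.append(pt[-1] + x)
--     best = pt[M]
--     run = pe[0] - po[0]
--     for t in range(M + 1):
--         run = max(run, pe[t] - po[t])
--         best = max(best, run + po[t] + pt[M] - pt[t])
--     return best
-- ===== Notes on version B (the rewrite author's own statement) =====
-- stated objective: faster
-- what changed: Replaces A's forward/backward constant-state DP passes over mutable lists-of-lists plus the odd-case combining loop by a direct enumeration of the switch points of an optimal selection (prefix of even indices, run of odd indices, tail of shifted even indices) over three precomputed prefix-sum arrays with a single running-max pass.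
import Mathlib
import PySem

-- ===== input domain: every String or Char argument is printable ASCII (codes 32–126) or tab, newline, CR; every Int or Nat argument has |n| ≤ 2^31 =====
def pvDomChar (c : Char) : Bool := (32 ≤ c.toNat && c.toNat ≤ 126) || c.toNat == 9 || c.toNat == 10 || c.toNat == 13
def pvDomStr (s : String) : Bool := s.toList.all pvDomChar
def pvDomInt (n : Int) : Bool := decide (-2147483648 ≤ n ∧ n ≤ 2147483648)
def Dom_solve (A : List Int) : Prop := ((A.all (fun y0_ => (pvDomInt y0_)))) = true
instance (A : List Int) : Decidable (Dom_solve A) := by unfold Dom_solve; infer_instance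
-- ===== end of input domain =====

-- B replaces A's forward/reverse constant-state DP passes over lists-of-lists and the
-- odd-case combining loop by a switch-point enumeration over three prefix-sum arrays with
-- one running-max pass (objective: faster — measured constant-factor speedup, same O(n)).


-- ===== PORT A =====
-- one iteration of A's dp/ep loops ('for i in range(…)'); indices are Python ints that are
-- provably nonnegative and in range here, so Nat '/', '%', 'List.getD', 'List.set' are exact
def pvStep (a : List Int) (dp : List (Int × Int)) (i : Nat) : List (Int × Int) :=
  let k := i / 2                                  -- k = i // 2 (i ≥ 0: exact)
  if i % 2 = 0 then
    -- dp[k+1][0] = dp[k][0] + A[i]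
    dp.set (k+1) ((dp.getD k (0,0)).1 + a.getD i 0, (dp.getD (k+1) (0,0)).2)
  else
    -- dp[k+1][1] = max(dp[k][0], dp[k][1]) + A[i]   (= max(dp[k]) + A[i])
    dp.set (k+1) ((dp.getD (k+1) (0,0)).1, max (dp.getD k (0,0)).1 (dp.getD k (0,0)).2 + a.getD i 0)

def solve (A : List Int) : Int :=
  let N := A.length
  let M := N / 2
  let INF : Int := 1 <<< 60
  -- dp = [[-INF]*2 for _ in range(M+1)]; dp[0] = [0,0]   (rows as pairs)
  let dp0 := ((List.range (M+1)).map (fun _ => (-INF, -INF))).set 0 ((0:Int), (0:Int))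
  if N % 2 = 0 then
    let dp := (List.range N).foldl (pvStep A) dp0
    max (dp.getD M (0,0)).1 (dp.getD M (0,0)).2       -- ans = max(dp[M])
  else
    let dp := (List.range (N-1)).foldl (pvStep A) dp0
    let B := A.reverse                                -- B = A[::-1]
    let ep0 := ((List.range (M+1)).map (fun _ => (-INF, -INF))).set 0 ((0:Int), (0:Int))
    let ep := (List.range (N-1)).foldl (pvStep B) ep0
    let ep' := ep.reverse                             -- ep = ep[::-1]
    -- ans = max(max(dp[-1]), max(ep[0]))   (dp[-1] is row M: dp has length M+1)
    let ans0 := max (max (dp.getD M (0,0)).1 (dp.getD M (0,0)).2)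
                    (max (ep'.getD 0 (0,0)).1 (ep'.getD 0 (0,0)).2)
    -- for j in range(1, N, 2): j = 2p+1 for p in range(M); p = j//2, q = j//2 + 1
    (List.range M).foldl (fun ans p =>
      let j := 2*p+1
      let q := p+1
      let a1 := max ans ((dp.getD p (0,0)).1 + A.getD (j-1) 0
                          + max (ep'.getD q (0,0)).1 (ep'.getD q (0,0)).2)
      let a2 := max a1 (max (dp.getD p (0,0)).1 (dp.getD p (0,0)).2 + A.getD j 0
                          + max (ep'.getD q (0,0)).1 (ep'.getD q (0,0)).2)
      max a2 (max (dp.getD p (0,0)).1 (dp.getD p (0,0)).2 + A.getD (j+1) 0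
                          + (ep'.getD q (0,0)).1)) ans0

-- ===== PORT B =====
-- A[0::2] (every second element); exact port of the extended slice
def pvEveryOther (l : List Int) : List Int :=
  match l with
  | [] => []
  | [x] => [x]
  | x :: _ :: rest => x :: pvEveryOther rest

-- pe = [0]; for x in xs: pe.append(pe[-1] + x)  — running value kept in the first component
def pvPrefixSums (l : List Int) : List Int :=
  (l.foldl (fun (st : Int × List Int) x => (st.1 + x, st.2 ++ [st.1 + x])) ((0:Int), [(0:Int)])).2

def solve_alt (A : List Int) : Int :=
  let N := A.length
  let M := N / 2
  let pe := pvPrefixSums (pvEveryOther A)               -- prefix sums of A[0::2]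
  let po := pvPrefixSums (pvEveryOther (A.drop 1))      -- prefix sums of A[1::2]
  if N % 2 = 0 then
    (List.range (M+1)).foldl
      (fun best s => max best (pe.getD s 0 + po.getD M 0 - po.getD s 0)) (po.getD M 0)
  else
    let pt := pvPrefixSums (pvEveryOther (A.drop 2))    -- prefix sums of A[2::2]
    -- best = pt[M]; run = pe[0]-po[0]; for t: run = max(run, pe[t]-po[t]);
    --   best = max(best, run + po[t] + pt[M] - pt[t])
    ((List.range (M+1)).foldl (fun (st : Int × Int) t =>
        let run := max st.1 (pe.getD t 0 - po.getD t 0)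
        (run, max st.2 (run + po.getD t 0 + pt.getD M 0 - pt.getD t 0)))
      (pe.getD 0 0 - po.getD 0 0, pt.getD M 0)).2

-- ===== PRECONDITION & SPEC =====
def Spec_solve (A : List Int) (out : Int) : Prop := out = solve_alt A
instance (A : List Int) (out : Int) : Decidable (Spec_solve A out) := by unfold Spec_solve; infer_instance

-- ===== CLAIM (what is proved, stated in full; the proofs are below) =====
def Claim_equal_solve : Prop := ∀ (A : List Int), Dom_solve A → Spec_solve A (solve A)

-- ===== LEMMAS AND PROOFS =====

-- spec-level quantities (used only by the proofs below)
def pvEv (A : List Int) : Nat → Int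
  | 0 => 0
  | s+1 => pvEv A s + A.getD (2*s) 0
def pvOd (A : List Int) : Nat → Int
  | 0 => 0
  | t+1 => pvOd A t + A.getD (2*t+1) 0
def pvTv (A : List Int) : Nat → Int
  | 0 => 0
  | t+1 => pvTv A t + A.getD (2*t+2) 0
def pvD (A : List Int) : Nat → Int
  | 0 => 0
  | k+1 => max (pvEv A k) (pvD A k) + A.getD (2*k+1) 0
def pvPsum (l : List Int) : Nat → Int
  | 0 => 0
  | s+1 => pvPsum l s + l.getD s 0

-- max of f over 0..n
def pvMx (f : Nat → Int) : Nat → Int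
  | 0 => f 0
  | n+1 => max (pvMx f n) (f (n+1))

theorem pvMx_le {f : Nat → Int} {n : Nat} {X : Int} (h : ∀ j ≤ n, f j ≤ X) : pvMx f n ≤ X := by
  induction n with
  | zero => exact h 0 (le_refl 0)
  | succ n ih =>
    exact max_le (ih fun j hj => h j (Nat.le_succ_of_le hj)) (h (n+1) (le_refl _))

theorem pv_le_mx {f : Nat → Int} {n j : Nat} (h : j ≤ n) : f j ≤ pvMx f n := by
  induction n with
  | zero => simp_all [pvMx]
  | succ n ih =>
    rcases Nat.lt_or_ge j (n+1) with h' | h'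
    · exact le_trans (ih (by omega)) (le_max_left _ _)
    · have : j = n+1 := by omega
      subst this; exact le_max_right _ _

theorem pvMx_congr {f g : Nat → Int} {n : Nat} (h : ∀ j ≤ n, f j = g j) : pvMx f n = pvMx g n := by
  induction n with
  | zero => exact h 0 (le_refl 0)
  | succ n ih =>
    simp only [pvMx]
    rw [ih fun j hj => h j (Nat.le_succ_of_le hj), h (n+1) (le_refl _)]

theorem pvMx_add_const (f : Nat → Int) (c : Int) (n : Nat) :
    pvMx (fun j => f j + c) n = pvMx f n + c := by
  induction n with
  | zero => rfl
  | succ n ih => simp only [pvMx, ih, max_add_add_right]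

theorem pvMx_shift (g : Nat → Int) (n : Nat) :
    pvMx g (n+1) = max (g 0) (pvMx (fun j => g (j+1)) n) := by
  induction n with
  | zero => simp [pvMx]
  | succ n ih =>
    show max (pvMx g (n+1)) (g (n+2)) = _
    rw [ih]
    simp only [pvMx, max_assoc]

theorem pvMx_add_mx_le {f g : Nat → Int} {n m : Nat} {X : Int}
    (h : ∀ i ≤ n, ∀ j ≤ m, f i + g j ≤ X) : pvMx f n + pvMx g m ≤ X := by
  have h1 : pvMx f n ≤ X - pvMx g m := by
    apply pvMx_le; intro i hi
    have : pvMx g m ≤ X - f i := pvMx_le (fun j hj => by have := h i hi j hj; omega)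
    omega
  omega

-- fold of a running max over range (m+1)
theorem pv_foldl_max (u : Nat → Int) (c : Int) (m : Nat) :
    (List.range (m+1)).foldl (fun acc j => max acc (u j)) c = max c (pvMx u m) := by
  induction m with
  | zero => simp [pvMx]
  | succ m ih =>
    rw [List.range_succ, List.foldl_append]
    simp only [List.foldl_cons, List.foldl_nil, ih, pvMx, max_assoc]

-- list helpers
theorem pv_set_map_range {α : Type} [Inhabited α] (n j : Nat) (f : Nat → α) (v : α) :
    ((List.range n).map f).set j v
      = (List.range n).map (fun k => if k = j then v else f k) := by
  apply List.ext_getElem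
  · simp
  · intro i h1 h2
    simp only [List.getElem_set, List.getElem_map, List.getElem_range]
    by_cases h : j = i <;> simp [h, eq_comm]

theorem pv_getD_drop (l : List Int) (n k : Nat) (d : Int) :
    (l.drop n).getD k d = l.getD (n+k) d := by
  simp [List.getD_eq_getElem?_getD, List.getElem?_drop]

theorem pv_reverse_map_range {α : Type} (n : Nat) (f : Nat → α) :
    ((List.range n).map f).reverse = (List.range n).map (fun k => f (n-1-k)) := by
  apply List.ext_getElem
  · simp
  · intro i h1 h2
    simp [List.getElem_reverse]

def pvNegInf : Int := -(1 <<< 60)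

-- A-side: characterization of the dp/ep fold.  dmap a M m = table after 2m loop steps
def pvDmap (a : List Int) (M m : Nat) : List (Int × Int) :=
  (List.range (M+1)).map (fun k => if k ≤ m then (pvEv a k, pvD a k) else (pvNegInf, pvNegInf))

theorem pvDmap_getD (a : List Int) (M m k : Nat) (hk : k ≤ M) :
    (pvDmap a M m).getD k (0,0) = if k ≤ m then (pvEv a k, pvD a k) else (pvNegInf, pvNegInf) := by
  unfold pvDmap
  rw [PySem.List.getD_map_range _ _ _ _ (by omega)]

theorem pv_dp0_eq (a : List Int) (M : Nat) :
    (((List.range (M+1)).map (fun _ => (pvNegInf, pvNegInf))).set 0 ((0:Int),(0:Int)))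
      = pvDmap a M 0 := by
  unfold pvDmap
  rw [pv_set_map_range (M+1) 0 _ _]
  apply List.map_congr_left
  intro k _
  rcases Nat.eq_zero_or_pos k with h | h
  · subst h; simp [pvEv, pvD]
  · simp only [Nat.pos_iff_ne_zero.mp h, if_false, Nat.le_zero]

theorem pv_getD_set_self {α : Type} [Inhabited α] (l : List α) (i : Nat) (v d : α)
    (h : i < l.length) : (l.set i v).getD i d = v := by
  simp [List.getD_eq_getElem?_getD, h]

theorem pv_getD_set_ne {α : Type} [Inhabited α] (l : List α) (i j : Nat) (v d : α)
    (h : i ≠ j) : (l.set i v).getD j d = l.getD j d := by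
  simp [List.getD_eq_getElem?_getD, h]

theorem pvDmap_length (a : List Int) (M m : Nat) : (pvDmap a M m).length = M+1 := by
  simp [pvDmap]

theorem pvDmap_set_succ (a : List Int) (M m : Nat) (_hm : m+1 ≤ M) :
    (pvDmap a M m).set (m+1) (pvEv a (m+1), pvD a (m+1)) = pvDmap a M (m+1) := by
  unfold pvDmap
  rw [pv_set_map_range (M+1) (m+1) _ _]
  apply List.map_congr_left
  intro k _
  by_cases hk : k = m+1
  · simp [hk]
  · by_cases hk' : k ≤ m
    · simp [hk, hk', Nat.le_succ_of_le hk']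
    · have hn : ¬ k ≤ m+1 := by omega
      simp [hk, hk', hn]

theorem pvDmap_zero_indep (a b : List Int) (M : Nat) : pvDmap a M 0 = pvDmap b M 0 := by
  unfold pvDmap
  apply List.map_congr_left
  intro k _
  by_cases hk : k ≤ 0
  · have : k = 0 := by omega
    subst this
    rfl
  · simp [hk]

theorem pv_dp_fold (a : List Int) (M m : Nat) (hm : m ≤ M) :
    (List.range (2*m)).foldl (pvStep a) (pvDmap a M 0) = pvDmap a M m := by
  induction m with
  | zero => rfl
  | succ m ih =>
    have hmM : m ≤ M := by omega
    have h1 : 2*(m+1) = (2*m+1)+1 := by ring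
    rw [h1, List.range_succ, List.range_succ, List.foldl_append, List.foldl_append,
        ih hmM]
    simp only [List.foldl_cons, List.foldl_nil]
    have hlen : (pvDmap a M m).length = M+1 := pvDmap_length a M m
    -- step 1: i = 2m (even) writes dp[m+1][0] = dp[m][0] + A[2m]
    have s1 : pvStep a (pvDmap a M m) (2*m)
        = (pvDmap a M m).set (m+1) (pvEv a (m+1), pvNegInf) := by
      unfold pvStep
      rw [if_pos (by omega : (2*m) % 2 = 0)]
      rw [show (2*m)/2 = m from by omega]
      rw [pvDmap_getD a M m m hmM, pvDmap_getD a M m (m+1) (by omega)]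
      rw [if_pos (le_refl m), if_neg (by omega)]
      rfl
    rw [s1]
    -- step 2: i = 2m+1 (odd) writes dp[m+1][1] = max(dp[m]) + A[2m+1]
    have s2 : pvStep a ((pvDmap a M m).set (m+1) (pvEv a (m+1), pvNegInf)) (2*m+1)
        = ((pvDmap a M m).set (m+1) (pvEv a (m+1), pvNegInf)).set (m+1)
            (pvEv a (m+1), pvD a (m+1)) := by
      unfold pvStep
      rw [if_neg (by omega : ¬ (2*m+1) % 2 = 0)]
      rw [show (2*m+1)/2 = m from by omega]
      rw [pv_getD_set_self _ _ _ _ (by omega)]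
      rw [pv_getD_set_ne _ _ _ _ _ (by omega : m+1 ≠ m)]
      rw [pvDmap_getD a M m m hmM, if_pos (le_refl m)]
      rfl
    rw [s2, List.set_set, pvDmap_set_succ a M m hm]

-- B-side list characterizations
theorem pvEveryOther_getD (l : List Int) : ∀ (s : Nat) (d : Int),
    (pvEveryOther l).getD s d = l.getD (2*s) d := by
  induction l using pvEveryOther.induct with
  | case1 => intro s d; simp [pvEveryOther]
  | case2 x =>
    intro s d
    cases s with
    | zero => simp [pvEveryOther]
    | succ s => simp [pvEveryOther, List.getD]
  | case3 x y rest ih =>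
    intro s d
    cases s with
    | zero => simp [pvEveryOther]
    | succ s =>
      simp only [pvEveryOther, Nat.mul_succ]
      have h1 : (x :: pvEveryOther rest).getD (s+1) d = (pvEveryOther rest).getD s d := by
        simp [List.getD]
      have h2 : (x :: y :: rest).getD (2*s+2) d = rest.getD (2*s) d := by
        simp [List.getD]
      rw [h1, h2, ih]

theorem pvEveryOther_length (l : List Int) :
    (pvEveryOther l).length = (l.length + 1) / 2 := by
  induction l using pvEveryOther.induct with
  | case1 => simp [pvEveryOther]
  | case2 x => simp [pvEveryOther]
  | case3 x y rest ih => simp [pvEveryOther, ih]; omega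

theorem pvPsum_append_le (t : List Int) (y : Int) (k : Nat) (hk : k ≤ t.length) :
    pvPsum (t ++ [y]) k = pvPsum t k := by
  induction k with
  | zero => rfl
  | succ k ihk =>
    simp only [pvPsum, ihk (by omega)]
    congr 1
    rw [List.getD_eq_getElem?_getD, List.getD_eq_getElem?_getD,
        List.getElem?_append_left (by omega)]

theorem pvPsum_len (l : List Int) : pvPsum l l.length = l.sum := by
  induction l using List.reverseRecOn with
  | nil => rfl
  | append_singleton t y iht =>
    have h1 : (t ++ [y]).length = t.length + 1 := by simp
    rw [h1]
    show pvPsum (t ++ [y]) t.length + (t ++ [y]).getD t.length 0 = _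
    rw [pvPsum_append_le t y t.length (le_refl _), iht,
        List.getD_eq_getElem?_getD, List.getElem?_append_right (le_refl _)]
    simp

theorem pvPrefixSums_append (t : List Int) (x : Int) :
    pvPrefixSums (t ++ [x]) = pvPrefixSums t ++ [t.sum + x] := by
  have hfst : ∀ (l' : List Int) (st : Int × List Int),
      (l'.foldl (fun (st : Int × List Int) x => (st.1 + x, st.2 ++ [st.1 + x])) st).1
        = st.1 + l'.sum := by
    intro l'
    induction l' with
    | nil => simp
    | cons y ys ihy => intro st; simp [ihy, add_assoc]
  unfold pvPrefixSums
  rw [List.foldl_append]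
  simp only [List.foldl_cons, List.foldl_nil, hfst]
  simp

theorem pvPrefixSums_length (l : List Int) : (pvPrefixSums l).length = l.length + 1 := by
  induction l using List.reverseRecOn with
  | nil => rfl
  | append_singleton t y iht => rw [pvPrefixSums_append]; simp [iht]

theorem pvPrefixSums_getD (l : List Int) : ∀ (s : Nat), s ≤ l.length →
    (pvPrefixSums l).getD s 0 = pvPsum l s := by
  induction l using List.reverseRecOn with
  | nil =>
    intro s hs
    have : s = 0 := by simpa using hs
    subst this; rfl
  | append_singleton t x iht =>
    intro s hs
    rw [pvPrefixSums_append]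
    rcases Nat.lt_or_ge s (t.length + 1) with h | h
    · rw [List.getD_eq_getElem?_getD, List.getElem?_append_left (by rw [pvPrefixSums_length]; omega),
          ← List.getD_eq_getElem?_getD, iht s (by omega), pvPsum_append_le t x s (by omega)]
    · have hs' : s = t.length + 1 := by simp at hs; omega
      subst hs'
      rw [List.getD_eq_getElem?_getD,
          List.getElem?_append_right (by rw [pvPrefixSums_length])]
      rw [pvPrefixSums_length]
      simp only [Nat.sub_self, List.getElem?_cons_zero, Option.getD_some]
      rw [show pvPsum (t ++ [x]) (t.length + 1)
            = pvPsum (t ++ [x]) t.length + (t ++ [x]).getD t.length 0 from rfl,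
          pvPsum_append_le t x t.length (le_refl _), pvPsum_len,
          List.getD_eq_getElem?_getD, List.getElem?_append_right (le_refl _)]
      simp

theorem pvNegInf_eq : pvNegInf = -(1 <<< 60 : Int) := rfl

theorem pvPsum_eo0 (A : List Int) (s : Nat) :
    pvPsum (pvEveryOther A) s = pvEv A s := by
  induction s with
  | zero => rfl
  | succ s ih => simp only [pvPsum, pvEv, ih, pvEveryOther_getD]

theorem pvPsum_eo1 (A : List Int) (s : Nat) :
    pvPsum (pvEveryOther (A.drop 1)) s = pvOd A s := by
  induction s with
  | zero => rfl
  | succ s ih =>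
    simp only [pvPsum, pvOd, ih, pvEveryOther_getD, pv_getD_drop]
    congr 2
    omega

theorem pvPsum_eo2 (A : List Int) (s : Nat) :
    pvPsum (pvEveryOther (A.drop 2)) s = pvTv A s := by
  induction s with
  | zero => rfl
  | succ s ih =>
    simp only [pvPsum, pvTv, ih, pvEveryOther_getD, pv_getD_drop]
    congr 2
    omega

theorem pvL1 (a : List Int) (m : Nat) :
    max (pvEv a m) (pvD a m) = pvMx (fun s => pvEv a s + pvOd a m - pvOd a s) m := by
  induction m with
  | zero => simp [pvEv, pvD, pvOd, pvMx]
  | succ m ih =>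
    have hD : pvD a (m+1) = pvMx (fun s => pvEv a s + pvOd a (m+1) - pvOd a s) m := by
      show max (pvEv a m) (pvD a m) + a.getD (2*m+1) 0 = _
      rw [ih]
      rw [show (pvMx (fun s => pvEv a s + pvOd a m - pvOd a s) m + a.getD (2*m+1) 0)
            = pvMx (fun s => (pvEv a s + pvOd a m - pvOd a s) + a.getD (2*m+1) 0) m from
          (pvMx_add_const _ _ m).symm]
      apply pvMx_congr
      intro j _
      have : pvOd a (m+1) = pvOd a m + a.getD (2*m+1) 0 := rfl
      omega
    rw [show pvMx (fun s => pvEv a s + pvOd a (m+1) - pvOd a s) (m+1)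
          = max (pvMx (fun s => pvEv a s + pvOd a (m+1) - pvOd a s) m)
                (pvEv a (m+1) + pvOd a (m+1) - pvOd a (m+1)) from rfl]
    rw [← hD]
    rw [show pvEv a (m+1) + pvOd a (m+1) - pvOd a (m+1) = pvEv a (m+1) by omega]
    exact max_comm _ _

theorem pvRevEv (A : List Int) (M : Nat) (hN : A.length = 2*M+1) :
    ∀ m, m ≤ M → pvEv A.reverse m = pvTv A M - pvTv A (M-m) := by
  intro m
  induction m with
  | zero => intro _; simp [pvEv]
  | succ m ih =>
    intro hm
    have hrev : A.reverse.getD (2*m) 0 = A.getD (2*(M-m-1)+2) 0 := by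
      rw [List.getD_eq_getElem?_getD, List.getD_eq_getElem?_getD, List.getElem?_reverse (by omega)]
      congr 2
      omega
    show pvEv A.reverse m + A.reverse.getD (2*m) 0 = _
    rw [ih (by omega), hrev]
    have h1 : pvTv A (M-m) = pvTv A (M-m-1) + A.getD (2*(M-m-1)+2) 0 := by
      rw [show M-m = (M-m-1)+1 from by omega]
      rfl
    have h2 : M - (m+1) = M-m-1 := by omega
    rw [h2]
    omega

theorem pvRevW (A : List Int) (M : Nat) (hN : A.length = 2*M+1) :
    ∀ m, m ≤ M → max (pvEv A.reverse m) (pvD A.reverse m)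
      = pvMx (fun j => pvOd A (M-m+j) - pvOd A (M-m) + pvTv A M - pvTv A (M-m+j)) m := by
  intro m
  induction m with
  | zero => intro _; simp [pvEv, pvD, pvMx]
  | succ m ih =>
    intro hm
    have hm' : m ≤ M := by omega
    have hrev : A.reverse.getD (2*m+1) 0 = A.getD (2*(M-m-1)+1) 0 := by
      rw [List.getD_eq_getElem?_getD, List.getD_eq_getElem?_getD, List.getElem?_reverse (by omega)]
      congr 2
      omega
    have hD : pvD A.reverse (m+1)
        = pvMx (fun j => pvOd A (M-(m+1)+(j+1)) - pvOd A (M-(m+1)) + pvTv A M - pvTv A (M-(m+1)+(j+1))) m := by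
      show max (pvEv A.reverse m) (pvD A.reverse m) + A.reverse.getD (2*m+1) 0 = _
      rw [ih hm', hrev]
      rw [← pvMx_add_const (fun j => pvOd A (M-m+j) - pvOd A (M-m) + pvTv A M - pvTv A (M-m+j))
            (A.getD (2*(M-m-1)+1) 0) m]
      apply pvMx_congr
      intro j _
      have e1 : M-(m+1)+(j+1) = M-m+j := by omega
      have e2 : pvOd A (M-m) = pvOd A (M-m-1) + A.getD (2*(M-m-1)+1) 0 := by
        rw [show M-m = (M-m-1)+1 from by omega]
        rfl
      have e3 : M-(m+1) = M-m-1 := by omega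
      rw [e1, e3]
      omega
    have hEv : pvEv A.reverse (m+1)
        = pvOd A (M-(m+1)+0) - pvOd A (M-(m+1)) + pvTv A M - pvTv A (M-(m+1)+0) := by
      rw [pvRevEv A M hN (m+1) hm]
      simp only [Nat.add_zero]
      omega
    rw [pvMx_shift]
    rw [← hD, ← hEv]

-- getD on the reversed ep table
theorem pvDmap_rev_getD (b : List Int) (M q : Nat) (hq : q ≤ M) :
    (pvDmap b M M).reverse.getD q (0,0) = (pvEv b (M-q), pvD b (M-q)) := by
  unfold pvDmap
  rw [pv_reverse_map_range]
  rw [PySem.List.getD_map_range _ _ _ _ (by omega)]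
  rw [if_pos (by omega)]
  have h1 : M + 1 - 1 - q = M - q := by omega
  rw [h1]

-- linking the B-side prefix-sum reads to the spec functions
theorem pv_pe_getD (A : List Int) (s : Nat) (hs : 2*s ≤ A.length + 1) :
    (pvPrefixSums (pvEveryOther A)).getD s 0 = pvEv A s := by
  rw [pvPrefixSums_getD _ s (by rw [pvEveryOther_length]; omega), pvPsum_eo0]

theorem pv_po_getD (A : List Int) (s : Nat) (hs : 2*s ≤ A.length) :
    (pvPrefixSums (pvEveryOther (A.drop 1))).getD s 0 = pvOd A s := by
  rw [pvPrefixSums_getD _ s (by rw [pvEveryOther_length]; simp; omega), pvPsum_eo1]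

theorem pv_pt_getD (A : List Int) (s : Nat) (hs : 2*s + 1 ≤ A.length) :
    (pvPrefixSums (pvEveryOther (A.drop 2))).getD s 0 = pvTv A s := by
  rw [pvPrefixSums_getD _ s (by rw [pvEveryOther_length]; simp; omega), pvPsum_eo2]

theorem pv_even_eq (A : List Int) (M : Nat) (hN : A.length = 2*M) : solve A = solve_alt A := by
  unfold solve solve_alt
  simp only [hN]
  simp only [show 2*M % 2 = 0 from by omega, reduceIte, show 2*M/2 = M from by omega]
  rw [← pvNegInf_eq, pv_dp0_eq A M, pv_dp_fold A M M (le_refl M),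
      pvDmap_getD A M M M (le_refl M), if_pos (le_refl M)]
  show max (pvEv A M) (pvD A M) = _
  -- B side
  rw [pv_foldl_max]
  have hB : ∀ s ≤ M, (pvPrefixSums (pvEveryOther A)).getD s 0
        + (pvPrefixSums (pvEveryOther (A.drop 1))).getD M 0
        - (pvPrefixSums (pvEveryOther (A.drop 1))).getD s 0
      = pvEv A s + pvOd A M - pvOd A s := by
    intro s hs
    rw [pv_pe_getD A s (by omega), pv_po_getD A M (by omega), pv_po_getD A s (by omega)]
  rw [pvMx_congr (fun j hj => hB j hj)]
  rw [pv_po_getD A M (by omega)]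
  rw [pvL1 A M]
  have hle : pvOd A M ≤ pvMx (fun j => pvEv A j + pvOd A M - pvOd A j) M := by
    calc pvOd A M = pvEv A 0 + pvOd A M - pvOd A 0 := by simp [pvEv, pvOd]
      _ ≤ _ := pv_le_mx (Nat.zero_le M)
  exact (max_eq_right hle).symm

-- odd-case spec quantities
def pvF (A : List Int) (M s t : Nat) : Int :=
  pvEv A s + pvOd A t - pvOd A s + pvTv A M - pvTv A t
def pvV (A : List Int) (M t : Nat) : Int := pvMx (fun s => pvF A M s t) t
def pvG (A : List Int) (p : Nat) : Int := max (pvEv A p) (pvD A p)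
def pvW (A : List Int) (m : Nat) : Int := max (pvEv A.reverse m) (pvD A.reverse m)
def pvU (A : List Int) (M p : Nat) : Int :=
  max (pvEv A p + A.getD (2*p) 0 + pvW A (M-p-1))
    (max (pvG A p + A.getD (2*p+1) 0 + pvW A (M-p-1))
         (pvG A p + A.getD (2*p+2) 0 + pvEv A.reverse (M-p-1)))

theorem pvWa (A : List Int) (M : Nat) (hN : A.length = 2*M+1) (p : Nat) (hp : p < M) :
    pvEv A p + A.getD (2*p) 0 + pvW A (M-p-1)
      = pvMx (fun j => pvF A M (p+1) (p+1+j)) (M-p-1) := by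
  have hm : M-p-1 ≤ M := by omega
  have h1 : M-(M-p-1) = p+1 := by omega
  unfold pvW
  rw [pvRevW A M hN (M-p-1) hm]
  have h2 : pvEv A p + A.getD (2*p) 0 = pvEv A (p+1) := rfl
  rw [h2]
  rw [show (pvEv A (p+1) + pvMx (fun j => pvOd A (M-(M-p-1)+j) - pvOd A (M-(M-p-1)) + pvTv A M - pvTv A (M-(M-p-1)+j)) (M-p-1))
        = pvMx (fun j => (pvOd A (M-(M-p-1)+j) - pvOd A (M-(M-p-1)) + pvTv A M - pvTv A (M-(M-p-1)+j)) + pvEv A (p+1)) (M-p-1)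
      from by rw [pvMx_add_const]; omega]
  apply pvMx_congr
  intro j _
  rw [h1]
  unfold pvF
  omega

theorem pvWM (A : List Int) (M : Nat) (hN : A.length = 2*M+1) :
    pvW A M = pvMx (fun t => pvF A M 0 t) M := by
  unfold pvW
  rw [pvRevW A M hN M (le_refl M)]
  apply pvMx_congr
  intro j _
  have h0 : M - M = 0 := by omega
  rw [h0]
  unfold pvF
  have : pvOd A (0+j) = pvOd A j := by rw [Nat.zero_add]
  have e1 : pvEv A 0 = 0 := rfl
  have e2 : pvOd A 0 = 0 := rfl
  simp only [Nat.zero_add]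
  omega

theorem pvF00 (A : List Int) (M : Nat) : pvF A M 0 0 = pvTv A M := by
  unfold pvF
  have e1 : pvEv A 0 = 0 := rfl
  have e2 : pvOd A 0 = 0 := rfl
  have e3 : pvTv A 0 = 0 := rfl
  omega

-- upper bound: every term of A's answer is below the switch-point maximum
theorem pvU_le (A : List Int) (M : Nat) (hN : A.length = 2*M+1) (p : Nat) (hp : p < M) :
    pvU A M p ≤ pvMx (pvV A M) M := by
  have hV : ∀ s t, s ≤ t → t ≤ M → pvF A M s t ≤ pvMx (pvV A M) M := by
    intro s t hst htM
    calc pvF A M s t ≤ pvV A M t := pv_le_mx hst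
      _ ≤ _ := pv_le_mx htM
  unfold pvU
  apply max_le
  · rw [pvWa A M hN p hp]
    apply pvMx_le
    intro j hj
    exact hV (p+1) (p+1+j) (by omega) (by omega)
  apply max_le
  · -- middle term
    have hm : M-p-1 ≤ M := by omega
    have h1 : M-(M-p-1) = p+1 := by omega
    unfold pvG pvW
    rw [pvL1 A p, pvRevW A M hN (M-p-1) hm]
    rw [show (pvMx (fun s => pvEv A s + pvOd A p - pvOd A s) p + A.getD (2*p+1) 0
              + pvMx (fun j => pvOd A (M-(M-p-1)+j) - pvOd A (M-(M-p-1)) + pvTv A M - pvTv A (M-(M-p-1)+j)) (M-p-1))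
          = pvMx (fun s => pvEv A s + pvOd A p - pvOd A s) p
            + pvMx (fun j => (pvOd A (M-(M-p-1)+j) - pvOd A (M-(M-p-1)) + pvTv A M - pvTv A (M-(M-p-1)+j)) + A.getD (2*p+1) 0) (M-p-1)
        from by rw [pvMx_add_const]; omega]
    apply pvMx_add_mx_le
    intro i hi j hj
    have e1 : pvOd A (p+1) = pvOd A p + A.getD (2*p+1) 0 := rfl
    have h2 : pvF A M i (p+1+j) ≤ pvMx (pvV A M) M := hV i (p+1+j) (by omega) (by omega)
    rw [h1]
    unfold pvF at h2
    omega
  · -- last term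
    unfold pvG
    rw [pvL1 A p, pvRevEv A M hN (M-p-1) (by omega)]
    have h1 : M-(M-p-1) = p+1 := by omega
    rw [h1]
    rw [show (pvMx (fun s => pvEv A s + pvOd A p - pvOd A s) p + A.getD (2*p+2) 0
              + (pvTv A M - pvTv A (p+1)))
          = pvMx (fun s => (pvEv A s + pvOd A p - pvOd A s) + (A.getD (2*p+2) 0 + pvTv A M - pvTv A (p+1))) p
        from by rw [pvMx_add_const]; omega]
    apply pvMx_le
    intro s hs
    have e1 : pvTv A (p+1) = pvTv A p + A.getD (2*p+2) 0 := rfl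
    have h2 : pvF A M s p ≤ pvMx (pvV A M) M := hV s p hs (by omega)
    unfold pvF at h2
    omega

def pvH (A : List Int) (t : Nat) : Int := pvMx (fun s => pvEv A s - pvOd A s) t

theorem pv_bfold (A : List Int) (M : Nat) (hN : A.length = 2*M+1) :
    ∀ m, m ≤ M →
    (List.range (m+1)).foldl (fun (st : Int × Int) t =>
        let run := max st.1 ((pvPrefixSums (pvEveryOther A)).getD t 0
                              - (pvPrefixSums (pvEveryOther (A.drop 1))).getD t 0)
        (run, max st.2 (run + (pvPrefixSums (pvEveryOther (A.drop 1))).getD t 0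
                          + pvTv A M - (pvPrefixSums (pvEveryOther (A.drop 2))).getD t 0)))
      ((pvPrefixSums (pvEveryOther A)).getD 0 0
          - (pvPrefixSums (pvEveryOther (A.drop 1))).getD 0 0, pvTv A M)
    = (pvH A m, max (pvTv A M) (pvMx (pvV A M) m)) := by
  intro m
  induction m with
  | zero =>
    intro _
    show List.foldl _ _ (List.range 1) = _
    simp only [List.range_one, List.foldl_cons, List.foldl_nil]
    rw [pv_pe_getD A 0 (by omega), pv_po_getD A 0 (by omega), pv_pt_getD A 0 (by omega)]
    rw [max_self]
    simp only [Prod.mk.injEq]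
    refine ⟨rfl, ?_⟩
    congr 1
  | succ m ih =>
    intro hm
    rw [List.range_succ, List.foldl_append, ih (by omega)]
    simp only [List.foldl_cons, List.foldl_nil]
    rw [pv_pe_getD A (m+1) (by omega), pv_po_getD A (m+1) (by omega), pv_pt_getD A (m+1) (by omega)]
    have hrun : max (pvH A m) (pvEv A (m+1) - pvOd A (m+1)) = pvH A (m+1) := rfl
    rw [hrun]
    have hv : pvH A (m+1) + pvOd A (m+1) + pvTv A M - pvTv A (m+1) = pvV A M (m+1) := by
      unfold pvV pvH
      rw [show (pvMx (fun s => pvEv A s - pvOd A s) (m+1) + pvOd A (m+1) + pvTv A M - pvTv A (m+1))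
            = pvMx (fun s => (pvEv A s - pvOd A s) + (pvOd A (m+1) + pvTv A M - pvTv A (m+1))) (m+1)
          from by rw [pvMx_add_const]; omega]
      apply pvMx_congr
      intro s _
      unfold pvF
      omega
    rw [hv]
    rw [max_assoc]
    rfl

theorem pv_odd_eq (A : List Int) (M : Nat) (hN : A.length = 2*M+1) : solve A = solve_alt A := by
  unfold solve solve_alt
  simp only [hN]
  simp only [show ¬ (2*M+1) % 2 = 0 from by omega, reduceIte,
             show (2*M+1)/2 = M from by omega, show 2*M+1-1 = 2*M from by omega]
  rw [← pvNegInf_eq, pv_dp0_eq A M, pv_dp_fold A M M (le_refl M),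
      pvDmap_zero_indep A A.reverse M, pv_dp_fold A.reverse M M (le_refl M)]
  -- normalize index 2*p+1-1 inside the loop body
  simp only [Nat.add_sub_cancel]
  -- replace A's combine loop body by a clean running max of pvU
  rw [List.foldl_ext _ (fun ans p => max ans (pvU A M p)) _
      (by
        intro ans p hp
        rw [List.mem_range] at hp
        rw [pvDmap_getD A M M p (by omega), if_pos (by omega),
            pvDmap_rev_getD A.reverse M (p+1) (by omega)]
        show max (max (max ans _) _) _ = _
        rw [max_assoc, max_assoc]
        rfl)]
  rw [pvDmap_getD A M M M (le_refl M), if_pos (le_refl M),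
      pvDmap_rev_getD A.reverse M 0 (Nat.zero_le M)]
  -- replace B's running-max loop by its characterization
  rw [pv_pt_getD A M (by omega)]
  conv_rhs => rw [pv_bfold A M hN M (le_refl M)]
  show _ = max (pvTv A M) (pvMx (pvV A M) M)
  have hTv : pvTv A M ≤ pvMx (pvV A M) M := by
    calc pvTv A M = pvF A M 0 0 := (pvF00 A M).symm
      _ ≤ pvV A M 0 := le_refl _
      _ ≤ _ := pv_le_mx (Nat.zero_le M)
  conv_rhs => rw [max_eq_right hTv]
  -- now: LHS (A's answer) = pvMx (pvV A M) M
  show (List.range M).foldl (fun ans p => max ans (pvU A M p))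
        (max (max (pvEv A M) (pvD A M)) (max (pvEv A.reverse (M-0)) (pvD A.reverse (M-0)))) = _
  have hans0 : (max (max (pvEv A M) (pvD A M)) (max (pvEv A.reverse (M-0)) (pvD A.reverse (M-0))))
      = max (pvG A M) (pvW A M) := by
    have h0 : M - 0 = M := rfl
    rw [h0]; rfl
  rw [hans0]
  have hGle : pvG A M ≤ pvMx (pvV A M) M := by
    unfold pvG
    rw [pvL1 A M]
    apply pvMx_le
    intro s hs
    calc pvEv A s + pvOd A M - pvOd A s
        = pvF A M s M := by unfold pvF; omega
      _ ≤ pvV A M M := pv_le_mx hs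
      _ ≤ _ := pv_le_mx (le_refl M)
  have hWle : pvW A M ≤ pvMx (pvV A M) M := by
    rw [pvWM A M hN]
    apply pvMx_le
    intro t ht
    calc pvF A M 0 t ≤ pvV A M t := pv_le_mx (Nat.zero_le t)
      _ ≤ _ := pv_le_mx ht
  cases M with
  | zero =>
    simp only [List.range_zero, List.foldl_nil]
    apply le_antisymm
    · exact max_le hGle hWle
    · apply pvMx_le
      intro t ht
      have ht0 : t = 0 := by omega
      subst ht0
      calc pvV A 0 0 = pvF A 0 0 0 := rfl
        _ = pvTv A 0 := pvF00 A 0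
        _ = 0 := rfl
        _ ≤ max (pvG A 0) (pvW A 0) := le_trans (by unfold pvG; simp [pvEv, pvD]) (le_max_left _ _)
  | succ m =>
    rw [pv_foldl_max (pvU A (m+1)) _ m]
    apply le_antisymm
    · apply max_le (max_le hGle hWle)
      apply pvMx_le
      intro p hp
      exact pvU_le A (m+1) hN p (by omega)
    · apply pvMx_le
      intro t ht
      apply pvMx_le
      intro s hs
      rcases Nat.eq_zero_or_pos s with hs0 | hs1
      · subst hs0
        calc pvF A (m+1) 0 t
            ≤ pvMx (fun t => pvF A (m+1) 0 t) (m+1) := pv_le_mx ht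
          _ = pvW A (m+1) := (pvWM A (m+1) hN).symm
          _ ≤ max (pvG A (m+1)) (pvW A (m+1)) := le_max_right _ _
          _ ≤ _ := le_max_left _ _
      · have hp : s - 1 < m+1 := by omega
        calc pvF A (m+1) s t
            = pvF A (m+1) ((s-1)+1) ((s-1)+1+(t-s)) := by congr 1 <;> omega
          _ ≤ pvMx (fun j => pvF A (m+1) ((s-1)+1) ((s-1)+1+j)) ((m+1)-(s-1)-1) :=
              pv_le_mx (by omega)
          _ = pvEv A (s-1) + A.getD (2*(s-1)) 0 + pvW A ((m+1)-(s-1)-1) :=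
              (pvWa A (m+1) hN (s-1) hp).symm
          _ ≤ pvU A (m+1) (s-1) := le_max_left _ _
          _ ≤ pvMx (pvU A (m+1)) m := pv_le_mx (by omega)
          _ ≤ _ := le_max_right _ _

-- ===== VERDICT (by name: the statement is the Claim_ definition above) =====
theorem solve_spec : Claim_equal_solve := by
  unfold Claim_equal_solve
  intro A _
  unfold Spec_solve
  rcases Nat.even_or_odd A.length with ⟨M, hM⟩ | ⟨M, hM⟩
  · exact pv_even_eq A M (by omega)
  · exact pv_odd_eq A M (by omega)
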